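-- pv_equiv track=rewrite | github.com/bilgee1121/descrete-math-report2.py | discreteMath_report2.py | equivalence_classes
-- ===== SOURCE A (Python) =====
-- from typing import List
--
-- def equivalence_classes(R: List[List[int]]) -> List[List[int]]:
--     n = len(R)
--     visited = [False] * n
--     classes = []
--     for i in range(n):
--         if not visited[i]:
--             comp = []
--             stack = [i]
--             visited[i] = True
--             while stack:
--                 u = stack.pop()
--                 comp.append(u + 1)
--                 for v in range(n):
--                     if R[u][v] == 1 and R[v][u] == 1 and not visited[v]:
--                         visited[v] = True
--                         stack.append(v)
--             classes.append(sorted(comp))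
--     classes.sort(key=lambda x: x[0])
--     return classes
-- ===== SOURCE B (Python) =====
-- def equivalence_classes(R):
--     n = len(R)
--     classes = []
--     for i in range(n):
--         # grow the class of i by iterating the one-step closure to a fixed point
--         comp = [u == i for u in range(n)]
--         for _ in range(n):
--             new = [comp[v] or any(comp[u] and R[u][v] == 1 and R[v][u] == 1
--                                   for u in range(n))
--                    for v in range(n)]
--             if new == comp:
--                 break
--             comp = new
--         members = [v + 1 for v in range(n) if comp[v]]
--         # keep the class only when i is its minimum (classes come out
--         # ascending by first element, each already sorted)
--         if members[0] == i + 1: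
--             classes.append(members)
--     return classes
-- ===== Notes on version B (the rewrite author's own statement) =====
-- stated objective: alternative
-- what changed: B replaces A's stack-based DFS with visited flags by a per-vertex fixed-point closure: for each i it grows the boolean indicator of i's class by iterating the one-step relation closure until it stops changing, keeps the class exactly when i is its minimum, and emits classes already sorted and ordered by first element, so no explicit sorting or visited bookkeeping is needed.
import Mathlib
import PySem

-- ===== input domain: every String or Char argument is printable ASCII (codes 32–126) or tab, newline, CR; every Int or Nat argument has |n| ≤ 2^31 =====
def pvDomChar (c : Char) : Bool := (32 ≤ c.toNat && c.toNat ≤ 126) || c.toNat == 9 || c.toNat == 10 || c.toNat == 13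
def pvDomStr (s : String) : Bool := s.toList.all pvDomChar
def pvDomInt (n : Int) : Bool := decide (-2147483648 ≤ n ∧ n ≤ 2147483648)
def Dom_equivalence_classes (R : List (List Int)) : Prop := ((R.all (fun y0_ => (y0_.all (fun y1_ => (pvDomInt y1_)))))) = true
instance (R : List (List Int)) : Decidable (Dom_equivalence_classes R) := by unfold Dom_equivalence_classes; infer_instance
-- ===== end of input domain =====

-- One honest line: B replaces A's DFS-with-stack by a per-vertex boolean fixed-point
-- closure that keeps a class exactly when its seed is minimal (objective: alternative).

-- R[u][v]; exact on inputs satisfying Pre_ (all indices in range there)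
def pvGetRC (R : List (List Int)) (u v : Nat) : Int := (R.getD u []).getD v 0

-- ===== PORT A =====
-- inner `for v in range(n)` of the while body: state (visited, stack)
def pvDfsInner (R : List (List Int)) (n u : Nat) (p : List Bool × List Nat) : List Bool × List Nat :=
  (List.range n).foldl
    (fun p v =>
      if pvGetRC R u v = 1 ∧ pvGetRC R v u = 1 ∧ p.1.getD v false = false then
        (p.1.set v true, v :: p.2)
      else p) p

-- `while stack:` as fuel recursion (fuel n+1 is proven sufficient below); stack top = head
def pvDfsA (R : List (List Int)) (n : Nat) :
    Nat → List Nat → List Bool → List Int → List Int × List Bool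
  | 0, _, vis, comp => (comp, vis)
  | _ + 1, [], vis, comp => (comp, vis)
  | fuel + 1, u :: st, vis, comp =>
      let comp' := comp ++ [(u : Int) + 1]
      let p := pvDfsInner R n u (vis, st)
      pvDfsA R n fuel p.2 p.1 comp'

-- outer `for i in range(n)`
def pvOuterA (R : List (List Int)) (n : Nat) :
    List Nat → List Bool → List (List Int) → List (List Int)
  | [], _, classes => classes
  | i :: rest, vis, classes =>
      if vis.getD i false then pvOuterA R n rest vis classes
      else
        let r := pvDfsA R n (n + 1) [i] (vis.set i true) []
        pvOuterA R n rest r.2 (classes ++ [PySem.List.sorted r.1 (fun x => x) false])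

def equivalence_classes (R : List (List Int)) : List (List Int) :=
  let n := R.length
  let classes := pvOuterA R n (List.range n) (List.replicate n false) []
  PySem.List.sorted classes (fun x => x.headD 0) false  -- classes.sort(key=lambda x: x[0]); all classes nonempty

-- ===== PORT B =====
-- one closure round: comp = [comp[v] or any(...) for v in range(n)]
def pvStepB (R : List (List Int)) (n : Nat) (comp : List Bool) : List Bool :=
  (List.range n).map (fun v =>
    comp.getD v false ||
      (List.range n).any (fun u =>
        comp.getD u false && (pvGetRC R u v == 1) && (pvGetRC R v u == 1)))

-- `for _ in range(k)` applying the round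
-- `for _ in range(k)`: apply the round, break at a fixed point
def pvIterB (R : List (List Int)) (n : Nat) : Nat → List Bool → List Bool
  | 0, comp => comp
  | k + 1, comp =>
      let new := pvStepB R n comp
      if new = comp then comp else pvIterB R n k new

-- body of `for i in range(n)`: emit the class grown from i exactly when i is its minimum
def pvStepClass (R : List (List Int)) (n : Nat) (classes : List (List Int)) (i : Nat) :
    List (List Int) :=
  let comp := pvIterB R n n ((List.range n).map (fun u => u == i))
  let members := ((List.range n).filter (fun v => comp.getD v false)).map
    (fun v : Nat => (v : Int) + 1)
  if members.headD 0 == (i : Int) + 1 then classes ++ [members] else classes  -- members[0]; never empty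

def equivalence_classes_alt (R : List (List Int)) : List (List Int) :=
  let n := R.length
  (List.range n).foldl (pvStepClass R n) []

-- ===== PRECONDITION & SPEC =====
-- Pre_ excludes exactly the ragged matrices (some row shorter than len(R)), on which A raises IndexError.
def Pre_equivalence_classes (R : List (List Int)) : Prop := ∀ row ∈ R, R.length ≤ row.length
instance (R : List (List Int)) : Decidable (Pre_equivalence_classes R) := by unfold Pre_equivalence_classes; infer_instance
def pvWitness_equivalence_classes : List (List Int) := [[1, 1, 0], [1, 1, 0], [0, 0, 1]]

def Spec_equivalence_classes (R : List (List Int)) (out : List (List Int)) : Prop := out = equivalence_classes_alt R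
instance (R : List (List Int)) (out : List (List Int)) : Decidable (Spec_equivalence_classes R out) := by unfold Spec_equivalence_classes; infer_instance

-- ===== CLAIM (what is proved, stated in full; the proofs are below) =====
def Claim_equal_equivalence_classes : Prop := ∀ (R : List (List Int)), Dom_equivalence_classes R → Pre_equivalence_classes R → Spec_equivalence_classes R (equivalence_classes R)

-- ===== LEMMAS AND PROOFS =====

def pvAdjC (R : List (List Int)) (u v : Nat) : Prop := pvGetRC R u v = 1 ∧ pvGetRC R v u = 1
def pvAdj (R : List (List Int)) (u v : Nat) : Prop := u < R.length ∧ v < R.length ∧ pvAdjC R u v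
def pvConn (R : List (List Int)) : Nat → Nat → Prop := Relation.ReflTransGen (pvAdj R)

lemma pvAdj_symm {R : List (List Int)} {u v : Nat} (h : pvAdj R u v) : pvAdj R v u := by
  obtain ⟨h1, h2, h3, h4⟩ := h; exact ⟨h2, h1, h4, h3⟩

lemma pvConn_symm {R : List (List Int)} {u v : Nat} (h : pvConn R u v) : pvConn R v u :=
  Relation.ReflTransGen.symmetric (fun _ _ h => pvAdj_symm h) h

lemma pvConn_lt {R : List (List Int)} {i v : Nat} (hi : i < R.length) (h : pvConn R i v) :
    v < R.length := by
  induction h with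
  | refl => exact hi
  | tail _ h2 _ => exact h2.2.1

-- getD toolbox
lemma getD_set_true {l : List Bool} {v : Nat} (h : v < l.length) (w : Nat) :
    (l.set v true).getD w false = if w = v then true else l.getD w false := by
  rcases eq_or_ne w v with rfl | hne
  · simp [List.getD, h]
  · simp [List.getD, List.getElem?_set_ne hne.symm, hne]

lemma getD_map_range {f : Nat → Bool} {n v : Nat} (h : v < n) :
    ((List.range n).map f).getD v false = f v := by simp [List.getD, h]

lemma getD_map_range_ge {f : Nat → Bool} {n v : Nat} (h : ¬ v < n) :
    ((List.range n).map f).getD v false = false := by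
  rw [List.getD_eq_default]; simp; omega

lemma getD_replicate {n v : Nat} : (List.replicate n false).getD v false = false := by
  rcases lt_or_ge v n with h | h
  · simp [List.getD, h]
  · rw [List.getD_eq_default]; simp [h]

lemma stepB_getD {R : List (List Int)} {n : Nat} (c : List Bool) (v : Nat) :
    ((pvStepB R n c).getD v false = true ↔
      v < n ∧ (c.getD v false = true ∨ ∃ u, u < n ∧ c.getD u false = true ∧ pvAdjC R u v)) := by
  rcases lt_or_ge v n with h | h
  · rw [pvStepB, getD_map_range h]
    simp [List.any_eq_true, pvAdjC, h, and_assoc]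
  · rw [pvStepB, getD_map_range_ge (by omega)]
    simp; omega

-- plain (no-break) iteration, used only by the proofs
def pvIterPlain (R : List (List Int)) (n : Nat) : Nat → List Bool → List Bool
  | 0, comp => comp
  | k + 1, comp => pvIterPlain R n k (pvStepB R n comp)

lemma iterPlain_fix {R : List (List Int)} {n : Nat} {c : List Bool}
    (h : pvStepB R n c = c) : ∀ k, pvIterPlain R n k c = c := by
  intro k
  induction k with
  | zero => rfl
  | succ k ih => rw [pvIterPlain, h, ih]

lemma iterB_eq_plain {R : List (List Int)} {n : Nat} :
    ∀ (k : Nat) (c : List Bool), pvIterB R n k c = pvIterPlain R n k c := by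
  intro k
  induction k with
  | zero => intro c; rfl
  | succ k ih =>
    intro c
    have hstep : pvIterB R n (k + 1) c =
        if pvStepB R n c = c then c else pvIterB R n k (pvStepB R n c) := rfl
    rw [hstep, pvIterPlain]
    by_cases h : pvStepB R n c = c
    · rw [if_pos h, h, iterPlain_fix h]
    · rw [if_neg h, ih]

def pvCompB (R : List (List Int)) (i k : Nat) : List Bool :=
  pvIterPlain R R.length k ((List.range R.length).map (fun u => u == i))

lemma iterB_succ_out {R : List (List Int)} {n : Nat} (k : Nat) (c : List Bool) :
    pvIterPlain R n (k + 1) c = pvStepB R n (pvIterPlain R n k c) := by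
  induction k generalizing c with
  | zero => rfl
  | succ k ih => rw [pvIterPlain, ih, pvIterPlain]

lemma compB_succ {R : List (List Int)} (i k : Nat) :
    pvCompB R i (k + 1) = pvStepB R R.length (pvCompB R i k) := iterB_succ_out k _

lemma compB_zero_getD {R : List (List Int)} {i v : Nat} :
    ((pvCompB R i 0).getD v false = true ↔ v = i ∧ v < R.length) := by
  rcases lt_or_ge v R.length with h | h
  · rw [pvCompB, pvIterPlain, getD_map_range h]; simp [h]
  · rw [pvCompB, pvIterPlain, getD_map_range_ge (by omega)]; simp; omega

lemma compB_lt {R : List (List Int)} {i k v : Nat}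
    (h : (pvCompB R i k).getD v false = true) : v < R.length := by
  cases k with
  | zero => exact (compB_zero_getD.1 h).2
  | succ k => rw [compB_succ] at h; exact ((stepB_getD _ _).1 h).1

lemma compB_mono {R : List (List Int)} {i k v : Nat}
    (h : (pvCompB R i k).getD v false = true) : (pvCompB R i (k + 1)).getD v false = true := by
  rw [compB_succ, stepB_getD]; exact ⟨compB_lt h, Or.inl h⟩

lemma compB_mono_le {R : List (List Int)} {i k m v : Nat} (hkm : k ≤ m)
    (h : (pvCompB R i k).getD v false = true) : (pvCompB R i m).getD v false = true := by
  induction m with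
  | zero => have : k = 0 := by omega
            subst this; exact h
  | succ m ih =>
    rcases Nat.lt_or_ge k (m + 1) with h' | h'
    · exact compB_mono (ih (by omega))
    · have : k = m + 1 := by omega
      subst this; exact h

lemma compB_sound {R : List (List Int)} {i : Nat} (hi : i < R.length) :
    ∀ k v, (pvCompB R i k).getD v false = true → pvConn R i v := by
  intro k
  induction k with
  | zero => intro v h; obtain ⟨rfl, _⟩ := compB_zero_getD.1 h; exact Relation.ReflTransGen.refl
  | succ k ih =>
    intro v h
    rw [compB_succ, stepB_getD] at h
    obtain ⟨hv, h | ⟨u, hu, hc, hadj⟩⟩ := h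
    · exact ih v h
    · exact Relation.ReflTransGen.tail (ih u hc) ⟨compB_lt hc, hv, hadj⟩

lemma stepB_congr {R : List (List Int)} {n : Nat} {c c' : List Bool}
    (h : ∀ v, c.getD v false = c'.getD v false) : pvStepB R n c = pvStepB R n c' := by
  simp only [pvStepB, h]

def pvSB (R : List (List Int)) (i k : Nat) : Finset Nat :=
  (Finset.range R.length).filter (fun v => (pvCompB R i k).getD v false = true)

lemma SB_mono {R : List (List Int)} {i k : Nat} : pvSB R i k ⊆ pvSB R i (k + 1) := by
  intro v hv
  rw [pvSB, Finset.mem_filter] at *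
  exact ⟨hv.1, compB_mono hv.2⟩

lemma compB_pe {R : List (List Int)} {i k : Nat} (h : pvSB R i k = pvSB R i (k + 1)) :
    ∀ v, (pvCompB R i k).getD v false = (pvCompB R i (k + 1)).getD v false := by
  intro v
  rcases lt_or_ge v R.length with hv | hv
  · have := Finset.ext_iff.1 h v
    simp [pvSB, Finset.mem_filter, Finset.mem_range, hv] at this
    cases hk : (pvCompB R i k).getD v false <;> cases hk1 : (pvCompB R i (k + 1)).getD v false <;> simp_all
  · cases hk : (pvCompB R i k).getD v false
    · cases hk1 : (pvCompB R i (k + 1)).getD v false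
      · rfl
      · exact absurd (compB_lt hk1) (by omega)
    · exact absurd (compB_lt hk) (by omega)

lemma compB_stab {R : List (List Int)} {i k : Nat} (h : pvSB R i k = pvSB R i (k + 1)) :
    ∀ m, k + 1 ≤ m → pvCompB R i m = pvCompB R i (k + 1) := by
  intro m hm
  induction m, hm using Nat.le_induction with
  | base => rfl
  | succ m hm ih =>
    rw [compB_succ, ih]
    calc pvStepB R R.length (pvCompB R i (k + 1))
        = pvStepB R R.length (pvCompB R i k) := stepB_congr (fun v => (compB_pe h v).symm)
      _ = pvCompB R i (k + 1) := (compB_succ i k).symm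

lemma SB_card_ge {R : List (List Int)} {i : Nat} (hi : i < R.length)
    (h : ∀ k, k < R.length → pvSB R i k ≠ pvSB R i (k + 1)) :
    ∀ k, k ≤ R.length → k + 1 ≤ (pvSB R i k).card := by
  intro k
  induction k with
  | zero =>
    intro _
    have : i ∈ pvSB R i 0 := by
      rw [pvSB, Finset.mem_filter, Finset.mem_range]
      exact ⟨hi, compB_zero_getD.2 ⟨rfl, hi⟩⟩
    exact Finset.card_pos.2 ⟨i, this⟩
  | succ k ih =>
    intro hk
    have hss : pvSB R i k ⊂ pvSB R i (k + 1) :=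
      lt_of_le_of_ne SB_mono (h k (by omega))
    have := Finset.card_lt_card hss
    have := ih (by omega)
    omega

lemma compB_fix {R : List (List Int)} {i : Nat} (hi : i < R.length) :
    pvCompB R i (R.length + 1) = pvCompB R i R.length := by
  by_cases hstab : ∃ k, k < R.length ∧ pvSB R i k = pvSB R i (k + 1)
  · obtain ⟨k, hk, he⟩ := hstab
    rw [compB_stab he (R.length + 1) (by omega), compB_stab he R.length (by omega)]
  · push Not at hstab
    have h := SB_card_ge hi hstab R.length le_rfl
    have : (pvSB R i R.length).card ≤ R.length := by
      calc (pvSB R i R.length).card ≤ (Finset.range R.length).card :=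
            Finset.card_le_card (Finset.filter_subset _ _)
        _ = R.length := Finset.card_range _
    omega

lemma compB_complete {R : List (List Int)} {i : Nat} (hi : i < R.length) :
    ∀ v, pvConn R i v → (pvCompB R i R.length).getD v false = true := by
  intro v h
  induction h with
  | refl => exact compB_mono_le (Nat.zero_le _) (compB_zero_getD.2 ⟨rfl, hi⟩)
  | @tail u w h1 h2 ih =>
    have : (pvCompB R i (R.length + 1)).getD w false = true := by
      rw [compB_succ, stepB_getD]
      exact ⟨h2.2.1, Or.inr ⟨_, h2.1, ih, h2.2.2⟩⟩
    rwa [compB_fix hi] at this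

lemma compB_char {R : List (List Int)} {i : Nat} (hi : i < R.length) (v : Nat) :
    ((pvCompB R i R.length).getD v false = true ↔ pvConn R i v) :=
  ⟨compB_sound hi _ v, compB_complete hi v⟩

def pvMembersB (R : List (List Int)) (i : Nat) : List Int :=
  ((List.range R.length).filter (fun v => (pvCompB R i R.length).getD v false)).map
    (fun v : Nat => (v : Int) + 1)

lemma mem_membersB {R : List (List Int)} {i : Nat} (hi : i < R.length) (x : Int) :
    (x ∈ pvMembersB R i ↔ ∃ v, pvConn R i v ∧ x = (v : Int) + 1) := by
  rw [pvMembersB]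
  simp only [List.mem_map, List.mem_filter, List.mem_range]
  constructor
  · rintro ⟨v, ⟨_, hc⟩, rfl⟩
    exact ⟨v, (compB_char hi v).1 hc, rfl⟩
  · rintro ⟨v, hc, rfl⟩
    exact ⟨v, ⟨pvConn_lt hi hc, (compB_char hi v).2 hc⟩, rfl⟩

lemma membersB_pairwise {R : List (List Int)} (i : Nat) :
    (pvMembersB R i).Pairwise (· < ·) := by
  rw [pvMembersB]
  refine List.Pairwise.map _ ?_ (List.Pairwise.filter _ (List.pairwise_lt_range))
  intro a b h
  omega

lemma membersB_nodup {R : List (List Int)} (i : Nat) : (pvMembersB R i).Nodup :=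
  (membersB_pairwise i).imp (fun h => ne_of_lt h)

lemma membersB_self {R : List (List Int)} {i : Nat} (hi : i < R.length) :
    ((i : Int) + 1) ∈ pvMembersB R i :=
  (mem_membersB hi _).2 ⟨i, Relation.ReflTransGen.refl, rfl⟩

lemma membersB_head_le {R : List (List Int)} {i : Nat} :
    ∀ x ∈ pvMembersB R i, (pvMembersB R i).headD 0 ≤ x := by
  intro x hx
  rcases hm : pvMembersB R i with _ | ⟨m, t⟩
  · simp [hm] at hx
  · have hp := membersB_pairwise (R := R) i
    rw [hm] at hp hx
    rcases List.mem_cons.1 hx with rfl | hx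
    · simp
    · simpa using le_of_lt ((List.pairwise_cons.1 hp).1 x hx)

lemma membersB_head {R : List (List Int)} {i : Nat} (hi : i < R.length) :
    ((pvMembersB R i).headD 0 = (i : Int) + 1 ↔ ∀ j, j < i → ¬ pvConn R i j) := by
  constructor
  · intro h j hj hc
    have hjm : ((j : Int) + 1) ∈ pvMembersB R i := (mem_membersB hi _).2 ⟨j, hc, rfl⟩
    have := membersB_head_le _ hjm
    rw [h] at this
    omega
  · intro h
    have hself := membersB_self hi
    rcases hm : pvMembersB R i with _ | ⟨m, t⟩
    · rw [hm] at hself; simp at hself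
    · have hmm : m ∈ pvMembersB R i := by rw [hm]; exact List.mem_cons_self
      obtain ⟨v, hc, rfl⟩ := (mem_membersB hi _).1 hmm
      have hle := membersB_head_le _ hself
      rw [hm] at hle
      simp only [List.headD_cons] at hle ⊢
      have hvi : ¬ v < i := fun hvi => h v hvi hc
      omega

def pvVisP (vis : List Bool) (v : Nat) : Prop := vis.getD v false = true

def pvUnvis (R : List (List Int)) (vis : List Bool) : Finset Nat :=
  (Finset.range R.length).filter (fun v => vis.getD v false = false)

lemma unvis_set {R : List (List Int)} {vis : List Bool} {v : Nat}
    (hlen : vis.length = R.length) (hv : v < R.length) :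
    pvUnvis R (vis.set v true) = (pvUnvis R vis).erase v := by
  ext w
  rw [pvUnvis, Finset.mem_filter, Finset.mem_erase, pvUnvis, Finset.mem_filter]
  rw [getD_set_true (by omega) w]
  rcases eq_or_ne w v with rfl | hne
  · simp
  · simp [hne]

def pvInner (R : List (List Int)) (u : Nat) (l : List Nat) (p : List Bool × List Nat) :
    List Bool × List Nat :=
  l.foldl (fun p v =>
    if pvGetRC R u v = 1 ∧ pvGetRC R v u = 1 ∧ p.1.getD v false = false then
      (p.1.set v true, v :: p.2)
    else p) p

lemma inner_spec (R : List (List Int)) (u : Nat) :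
    ∀ (l : List Nat), (∀ v ∈ l, v < R.length) →
    ∀ (vis : List Bool) (st : List Nat), vis.length = R.length →
      (∀ w ∈ st, pvVisP vis w) → st.Nodup →
      ((pvInner R u l (vis, st)).1.length = R.length) ∧
      (∀ w, pvVisP vis w → pvVisP (pvInner R u l (vis, st)).1 w) ∧
      (∀ w, pvVisP (pvInner R u l (vis, st)).1 w → pvVisP vis w ∨ (w ∈ l ∧ pvAdjC R u w)) ∧
      (∀ w, w ∈ (pvInner R u l (vis, st)).2 ↔
        w ∈ st ∨ (pvVisP (pvInner R u l (vis, st)).1 w ∧ ¬ pvVisP vis w)) ∧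
      (∀ w ∈ (pvInner R u l (vis, st)).2, pvVisP (pvInner R u l (vis, st)).1 w) ∧
      ((pvInner R u l (vis, st)).2.Nodup) ∧
      (∀ w ∈ l, pvAdjC R u w → pvVisP (pvInner R u l (vis, st)).1 w) ∧
      ((pvUnvis R (pvInner R u l (vis, st)).1).card + (pvInner R u l (vis, st)).2.length
        = (pvUnvis R vis).card + st.length) := by
  intro l
  induction l with
  | nil =>
    intro _ vis st hlen hst hnod
    simp only [pvInner, List.foldl_nil]
    refine ⟨hlen, fun w h => h, fun w h => Or.inl h, ?_, hst, hnod, by simp, by trivial⟩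
    intro w
    constructor
    · intro h; exact Or.inl h
    · rintro (h | ⟨h1, h2⟩)
      · exact h
      · exact absurd h1 h2
  | cons v l ih =>
    intro hl vis st hlen hst hnod
    have hv : v < R.length := hl v List.mem_cons_self
    have hl2 : ∀ w ∈ l, w < R.length := fun w hw => hl w (List.mem_cons_of_mem _ hw)
    by_cases hc : pvGetRC R u v = 1 ∧ pvGetRC R v u = 1 ∧ vis.getD v false = false
    · have hstep : pvInner R u (v :: l) (vis, st) = pvInner R u l (vis.set v true, v :: st) := by
        simp only [pvInner, List.foldl_cons, if_pos hc]
      rw [hstep]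
      have hlen1 : (vis.set v true).length = R.length := by simp [hlen]
      have hset : ∀ w, pvVisP (vis.set v true) w ↔ (w = v ∨ pvVisP vis w) := by
        intro w
        rw [pvVisP, getD_set_true (by omega) w]
        rcases eq_or_ne w v with rfl | hne
        · simp
        · simp [hne, pvVisP]
      have hst1 : ∀ w ∈ v :: st, pvVisP (vis.set v true) w := by
        intro w hw
        rcases List.mem_cons.1 hw with rfl | hw
        · exact (hset w).2 (Or.inl rfl)
        · exact (hset w).2 (Or.inr (hst w hw))
      have hvnotst : v ∉ st := fun hmem => by
        have := hst v hmem
        rw [pvVisP, hc.2.2] at this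
        exact Bool.false_ne_true this
      have hnod1 : (v :: st).Nodup := List.nodup_cons.2 ⟨hvnotst, hnod⟩
      obtain ⟨c1, c2, c3, c4, c5, c6, c7, c8⟩ := ih hl2 (vis.set v true) (v :: st) hlen1 hst1 hnod1
      refine ⟨c1, ?_, ?_, ?_, c5, c6, ?_, ?_⟩
      · intro w hw
        exact c2 w ((hset w).2 (Or.inr hw))
      · intro w hw
        rcases c3 w hw with hw2 | ⟨hmem, hadj⟩
        · rcases (hset w).1 hw2 with rfl | hw3
          · exact Or.inr ⟨List.mem_cons_self, ⟨hc.1, hc.2.1⟩⟩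
          · exact Or.inl hw3
        · exact Or.inr ⟨List.mem_cons_of_mem _ hmem, hadj⟩
      · intro w
        rw [c4 w]
        constructor
        · rintro (hw | ⟨h1, h2⟩)
          · rcases List.mem_cons.1 hw with rfl | hw2
            · refine Or.inr ⟨c2 w ((hset w).2 (Or.inl rfl)), ?_⟩
              rw [pvVisP, hc.2.2]
              exact Bool.false_ne_true
            · exact Or.inl hw2
          · refine Or.inr ⟨h1, ?_⟩
            intro hvw
            exact h2 ((hset w).2 (Or.inr hvw))
        · rintro (hw | ⟨h1, h2⟩)
          · exact Or.inl (List.mem_cons_of_mem _ hw)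
          · by_cases hwv : w = v
            · subst hwv
              exact Or.inl List.mem_cons_self
            · refine Or.inr ⟨h1, ?_⟩
              intro hw2
              rcases (hset w).1 hw2 with rfl | hw3
              · exact hwv rfl
              · exact h2 hw3
      · intro w hw hadj
        rcases List.mem_cons.1 hw with rfl | hw2
        · exact c2 w ((hset w).2 (Or.inl rfl))
        · exact c7 w hw2 hadj
      · rw [c8, unvis_set hlen hv]
        have hvmem : v ∈ pvUnvis R vis := by
          rw [pvUnvis, Finset.mem_filter, Finset.mem_range]
          exact ⟨hv, hc.2.2⟩
        rw [Finset.card_erase_of_mem hvmem]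
        have hpos : 1 ≤ (pvUnvis R vis).card := Finset.card_pos.2 ⟨v, hvmem⟩
        simp only [List.length_cons]
        omega
    · have hstep : pvInner R u (v :: l) (vis, st) = pvInner R u l (vis, st) := by
        simp only [pvInner, List.foldl_cons, if_neg hc]
      rw [hstep]
      obtain ⟨c1, c2, c3, c4, c5, c6, c7, c8⟩ := ih hl2 vis st hlen hst hnod
      refine ⟨c1, c2, ?_, c4, c5, c6, ?_, c8⟩
      · intro w hw
        rcases c3 w hw with hw2 | ⟨hmem, hadj⟩
        · exact Or.inl hw2
        · exact Or.inr ⟨List.mem_cons_of_mem _ hmem, hadj⟩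
      · intro w hw hadj
        rcases List.mem_cons.1 hw with rfl | hw2
        · have hvis : pvVisP vis w := by
            rw [pvVisP]
            rcases hb : vis.getD w false with _ | _
            · exact absurd ⟨hadj.1, hadj.2, hb⟩ hc
            · rfl
          exact c2 w hvis
        · exact c7 w hw2 hadj

def InvA (R : List (List Int)) (i : Nat) (vis0 vis : List Bool) (st : List Nat)
    (comp : List Int) : Prop :=
  vis.length = R.length ∧
  (∀ v, pvVisP vis0 v → pvVisP vis v) ∧
  (∀ v, pvVisP vis v → pvVisP vis0 v ∨ pvConn R i v) ∧
  (∀ u ∈ st, u < R.length ∧ pvVisP vis u ∧ ¬ pvVisP vis0 u) ∧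
  (∀ v, v < R.length → ((pvVisP vis v ∧ ¬ pvVisP vis0 v) ↔ (((v : Int) + 1) ∈ comp ∨ v ∈ st))) ∧
  (∀ x ∈ comp, ∃ u, u < R.length ∧ x = (u : Int) + 1 ∧ u ∉ st) ∧
  (∀ u, u < R.length → ((u : Int) + 1) ∈ comp → ∀ v, pvAdj R u v → pvVisP vis v) ∧
  comp.Nodup ∧ st.Nodup ∧ (∀ u ∈ st, ((u : Int) + 1) ∉ comp) ∧
  pvVisP vis i ∧ ¬ pvVisP vis0 i



lemma dfsA_step (R : List (List Int)) (fuel u : Nat) (st : List Nat) (vis : List Bool)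
    (comp : List Int) :
    pvDfsA R R.length (fuel + 1) (u :: st) vis comp =
      pvDfsA R R.length fuel (pvInner R u (List.range R.length) (vis, st)).2
        (pvInner R u (List.range R.length) (vis, st)).1 (comp ++ [(u : Int) + 1]) := rfl

lemma dfsA_spec (R : List (List Int)) (i : Nat) (vis0 : List Bool) :
    ∀ (fuel : Nat) (st : List Nat) (vis : List Bool) (comp : List Int),
      InvA R i vis0 vis st comp →
      (pvUnvis R vis).card + st.length < fuel →
      InvA R i vis0 (pvDfsA R R.length fuel st vis comp).2 []
        (pvDfsA R R.length fuel st vis comp).1 := by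
  intro fuel
  induction fuel with
  | zero => intro st vis comp _ h; omega
  | succ fuel ih =>
    intro st vis comp hinv hfuel
    match st with
    | [] => exact hinv
    | u :: st' =>
      obtain ⟨h1, h2, h3, h4, h5, h6, h7, h8, h9, h10, h11, h12⟩ := hinv
      obtain ⟨hun, hviu, hnv0u⟩ := h4 u List.mem_cons_self
      have hconnu : pvConn R i u := (h3 u hviu).resolve_left hnv0u
      have hst'v : ∀ w ∈ st', pvVisP vis w := fun w hw => (h4 w (List.mem_cons_of_mem _ hw)).2.1
      have hst'n : st'.Nodup := (List.nodup_cons.1 h9).2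
      have hunotst' : u ∉ st' := (List.nodup_cons.1 h9).1
      obtain ⟨c1, c2, c3, c4, c5, c6, c7, c8⟩ :=
        inner_spec R u (List.range R.length) (fun v hv => List.mem_range.1 hv) vis st' h1 hst'v hst'n
      rw [dfsA_step]
      set q := pvInner R u (List.range R.length) (vis, st') with hq
      have hq2lt : ∀ w ∈ q.2, w < R.length := by
        intro w hw
        rcases (c4 w).1 hw with hw' | ⟨hq1w, hnw⟩
        · exact (h4 w (List.mem_cons_of_mem _ hw')).1
        · rcases c3 w hq1w with hv | ⟨hmem, _⟩
          · exact absurd hv hnw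
          · exact List.mem_range.1 hmem
      have hcompvis : ∀ v : Nat, v < R.length → ((v : Int) + 1) ∈ comp → pvVisP vis v := by
        intro v hv hc
        exact ((h5 v hv).2 (Or.inl hc)).1
      have hinv' : InvA R i vis0 q.1 q.2 (comp ++ [(u : Int) + 1]) := by
        refine ⟨c1, fun v hv => c2 v (h2 v hv), ?_, ?_, ?_, ?_, ?_, ?_, c6, ?_, c2 i h11, h12⟩
        · -- (3)
          intro v hv
          rcases c3 v hv with hv' | ⟨hmem, hadj⟩
          · exact h3 v hv'
          · exact Or.inr (Relation.ReflTransGen.tail hconnu ⟨hun, List.mem_range.1 hmem, hadj⟩)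
        · -- (4)
          intro w hw
          refine ⟨hq2lt w hw, c5 w hw, ?_⟩
          rcases (c4 w).1 hw with hw' | ⟨_, hnw⟩
          · exact (h4 w (List.mem_cons_of_mem _ hw')).2.2
          · exact fun hv0 => hnw (h2 w hv0)
        · -- (5)
          intro v hv
          constructor
          · rintro ⟨hq1v, hnv0⟩
            by_cases hvv : pvVisP vis v
            · rcases (h5 v hv).1 ⟨hvv, hnv0⟩ with hc | hs
              · exact Or.inl (List.mem_append.2 (Or.inl hc))
              · rcases List.mem_cons.1 hs with rfl | hs'
                · exact Or.inl (List.mem_append.2 (Or.inr (List.mem_singleton.2 rfl)))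
                · exact Or.inr ((c4 v).2 (Or.inl hs'))
            · exact Or.inr ((c4 v).2 (Or.inr ⟨hq1v, hvv⟩))
          · rintro (hc | hs)
            · rcases List.mem_append.1 hc with hc' | hc'
              · have := (h5 v hv).2 (Or.inl hc')
                exact ⟨c2 v this.1, this.2⟩
              · have hvu : v = u := by
                  have := List.mem_singleton.1 hc'
                  omega
                subst hvu
                exact ⟨c2 v hviu, hnv0u⟩
            · rcases (c4 v).1 hs with hs' | ⟨hq1v, hnvv⟩
              · have := (h4 v (List.mem_cons_of_mem _ hs')).2
                exact ⟨c2 v this.1, this.2⟩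
              · exact ⟨hq1v, fun hv0 => hnvv (h2 v hv0)⟩
        · -- (6)
          intro x hx
          rcases List.mem_append.1 hx with hx' | hx'
          · obtain ⟨u', hu', hxu', hu'st⟩ := h6 x hx'
            refine ⟨u', hu', hxu', ?_⟩
            intro hq2
            rcases (c4 u').1 hq2 with hs | ⟨_, hnw⟩
            · exact hu'st (List.mem_cons_of_mem _ hs)
            · subst hxu'
              exact hnw (hcompvis u' hu' hx')
          · refine ⟨u, hun, List.mem_singleton.1 hx', ?_⟩
            intro hq2
            rcases (c4 u).1 hq2 with hs | ⟨_, hnw⟩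
            · exact hunotst' hs
            · exact hnw hviu
        · -- (7)
          intro u' hu' hmem v hadj
          rcases List.mem_append.1 hmem with hc | hc
          · exact c2 v (h7 u' hu' hc v hadj)
          · have huu : u' = u := by
              have := List.mem_singleton.1 hc
              omega
            subst huu
            exact c7 v (List.mem_range.2 hadj.2.1) hadj.2.2
        · -- (8)
          rw [List.nodup_append]
          refine ⟨h8, List.nodup_singleton _, ?_⟩
          intro x hx y hy
          rw [List.mem_singleton.1 hy]
          intro heq
          rw [heq] at hx
          exact h10 u List.mem_cons_self hx
        · -- (10)
          intro w hw hmem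
          rcases List.mem_append.1 hmem with hc | hc
          · rcases (c4 w).1 hw with hs | ⟨_, hnw⟩
            · exact h10 w (List.mem_cons_of_mem _ hs) hc
            · exact hnw (hcompvis w (hq2lt w hw) hc)
          · have hwu : w = u := by
              have := List.mem_singleton.1 hc
              omega
            subst hwu
            rcases (c4 w).1 hw with hs | ⟨_, hnw⟩
            · exact hunotst' hs
            · exact hnw hviu
      have hm : (pvUnvis R q.1).card + q.2.length < fuel := by
        have := c8
        simp only [List.length_cons] at hfuel
        omega
      exact ih q.2 q.1 (comp ++ [(u : Int) + 1]) hinv' hm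


lemma dfsA_final (R : List (List Int)) (i : Nat) (vis0 : List Bool)
    (hlen : vis0.length = R.length) (hi : i < R.length) (hni : ¬ pvVisP vis0 i)
    (hclosed : ∀ u v, pvVisP vis0 u → pvAdj R u v → pvVisP vis0 v) :
    (∀ v, pvVisP (pvDfsA R R.length (R.length + 1) [i] (vis0.set i true) []).2 v ↔
      (pvVisP vis0 v ∨ pvConn R i v)) ∧
    (∀ x, x ∈ (pvDfsA R R.length (R.length + 1) [i] (vis0.set i true) []).1 ↔
      ∃ v, pvConn R i v ∧ x = (v : Int) + 1) ∧
    (pvDfsA R R.length (R.length + 1) [i] (vis0.set i true) []).1.Nodup ∧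
    (pvDfsA R R.length (R.length + 1) [i] (vis0.set i true) []).2.length = R.length := by
  have hset : ∀ w, pvVisP (vis0.set i true) w ↔ (w = i ∨ pvVisP vis0 w) := by
    intro w
    rw [pvVisP, getD_set_true (by omega) w]
    rcases eq_or_ne w i with rfl | hne
    · simp
    · simp [hne, pvVisP]
  have hgd : vis0.getD i false = false := by
    rcases hb : vis0.getD i false with _ | _
    · rfl
    · exact absurd hb hni
  have hinv0 : InvA R i vis0 (vis0.set i true) [i] [] := by
    refine ⟨by simp [hlen], fun v hv => (hset v).2 (Or.inr hv), ?_, ?_, ?_, by simp, by simp,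
      List.nodup_nil, List.nodup_singleton _, by simp, (hset i).2 (Or.inl rfl), hni⟩
    · intro v hv
      rcases (hset v).1 hv with rfl | hv'
      · exact Or.inr Relation.ReflTransGen.refl
      · exact Or.inl hv'
    · intro u hu
      rw [List.mem_singleton.1 hu]
      exact ⟨hi, (hset i).2 (Or.inl rfl), hni⟩
    · intro v hv
      constructor
      · rintro ⟨h1, h2⟩
        rcases (hset v).1 h1 with rfl | h1'
        · exact Or.inr List.mem_cons_self
        · exact absurd h1' h2
      · rintro (hc | hs)
        · exact absurd hc (List.not_mem_nil)
        · rw [List.mem_singleton.1 hs]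
          exact ⟨(hset i).2 (Or.inl rfl), hni⟩
  have himem : i ∈ pvUnvis R vis0 := by
    rw [pvUnvis, Finset.mem_filter, Finset.mem_range]
    exact ⟨hi, hgd⟩
  have hcard : (pvUnvis R vis0).card ≤ R.length := by
    calc (pvUnvis R vis0).card ≤ (Finset.range R.length).card :=
        Finset.card_le_card (Finset.filter_subset _ _)
      _ = R.length := Finset.card_range _
  have hm : (pvUnvis R (vis0.set i true)).card + ([i] : List Nat).length < R.length + 1 := by
    rw [unvis_set hlen hi, Finset.card_erase_of_mem himem]
    have : 1 ≤ (pvUnvis R vis0).card := Finset.card_pos.2 ⟨i, himem⟩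
    simp only [List.length_cons, List.length_nil]
    omega
  obtain ⟨f1, f2, f3, f4, f5, f6, f7, f8, f9, f10, f11, f12⟩ :=
    dfsA_spec R i vis0 (R.length + 1) [i] (vis0.set i true) [] hinv0 hm
  set r := pvDfsA R R.length (R.length + 1) [i] (vis0.set i true) [] with hr
  have hnewly : ∀ v, pvConn R i v → pvVisP r.2 v ∧ ¬ pvVisP vis0 v := by
    intro v hv
    induction hv with
    | refl => exact ⟨f11, f12⟩
    | @tail u w h1 h2 ihc =>
      have hu : u < R.length := pvConn_lt hi h1
      have humem : ((u : Int) + 1) ∈ r.1 := by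
        rcases (f5 u hu).1 ⟨ihc.1, ihc.2⟩ with hc | hs
        · exact hc
        · exact absurd hs (List.not_mem_nil)
      refine ⟨f7 u hu humem w h2, ?_⟩
      intro h0w
      exact ihc.2 (hclosed w u h0w (pvAdj_symm h2))
  refine ⟨?_, ?_, f8, f1⟩
  · intro v
    constructor
    · exact f3 v
    · rintro (hv | hv)
      · exact f2 v hv
      · exact (hnewly v hv).1
  · intro x
    constructor
    · intro hx
      obtain ⟨u, hu, rfl, _⟩ := f6 x hx
      have := (f5 u hu).2 (Or.inl hx)
      exact ⟨u, (f3 u this.1).resolve_left this.2, rfl⟩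
    · rintro ⟨v, hv, rfl⟩
      have hvn : v < R.length := pvConn_lt hi hv
      rcases (f5 v hvn).1 (hnewly v hv) with hc | hs
      · exact hc
      · exact absurd hs (List.not_mem_nil)

lemma stepClass_eq (R : List (List Int)) (classes : List (List Int)) (i : Nat) :
    pvStepClass R R.length classes i =
      if (pvMembersB R i).headD 0 == (i : Int) + 1 then classes ++ [pvMembersB R i]
      else classes := by
  rw [pvStepClass, iterB_eq_plain]
  rfl

lemma loop_eq (R : List (List Int)) :
    ∀ (k m : Nat), m + k = R.length →
    ∀ (vis : List Bool) (acc : List (List Int)),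
      vis.length = R.length →
      (∀ v, pvVisP vis v ↔ ∃ j, j < m ∧ pvConn R j v) →
      pvOuterA R R.length (List.range' m k) vis acc =
        (List.range' m k).foldl (pvStepClass R R.length) acc := by
  intro k
  induction k with
  | zero => intro m hmk vis acc hlen hvis; rfl
  | succ k ih =>
    intro m hmk vis acc hlen hvis
    have hm : m < R.length := by omega
    rw [List.range'_succ]
    rcases hv : vis.getD m false with _ | _
    · -- unvisited: both emit
      have hnv : ¬ pvVisP vis m := by rw [pvVisP, hv]; exact Bool.false_ne_true
      have hclosed : ∀ u v, pvVisP vis u → pvAdj R u v → pvVisP vis v := by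
        intro u v hu hadj
        obtain ⟨j, hj, hc⟩ := (hvis u).1 hu
        exact (hvis v).2 ⟨j, hj, Relation.ReflTransGen.tail hc hadj⟩
      obtain ⟨fa, fb, fc, fd⟩ := dfsA_final R m vis hlen hm hnv hclosed
      have hmin : ∀ j, j < m → ¬ pvConn R m j := by
        intro j hj hc
        exact hnv ((hvis m).2 ⟨j, hj, pvConn_symm hc⟩)
      have hhead : (pvMembersB R m).headD 0 = (m : Int) + 1 := (membersB_head hm).2 hmin
      have hperm : (pvMembersB R m).Perm
          (pvDfsA R R.length (R.length + 1) [m] (vis.set m true) []).1 :=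
        (List.perm_ext_iff_of_nodup (membersB_nodup m) fc).2
          (fun x => (mem_membersB hm x).trans (fb x).symm)
      have hsorted : PySem.List.sorted
          (pvDfsA R R.length (R.length + 1) [m] (vis.set m true) []).1 (fun x => x) false =
          pvMembersB R m :=
        PySem.List.sorted_eq_of_perm_of_pairwise_lt _ _ _ hperm
          (by simpa using membersB_pairwise (R := R) m)
      have hA : pvOuterA R R.length (m :: List.range' (m + 1) k) vis acc =
          pvOuterA R R.length (List.range' (m + 1) k)
            (pvDfsA R R.length (R.length + 1) [m] (vis.set m true) []).2
            (acc ++ [pvMembersB R m]) := by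
        rw [pvOuterA, if_neg (by rw [hv]; exact Bool.false_ne_true)]
        show pvOuterA R R.length (List.range' (m + 1) k)
            (pvDfsA R R.length (R.length + 1) [m] (vis.set m true) []).2
            (acc ++ [PySem.List.sorted
              (pvDfsA R R.length (R.length + 1) [m] (vis.set m true) []).1 (fun x => x) false]) = _
        rw [hsorted]
      have hB : (m :: List.range' (m + 1) k).foldl (pvStepClass R R.length) acc =
          (List.range' (m + 1) k).foldl (pvStepClass R R.length) (acc ++ [pvMembersB R m]) := by
        rw [List.foldl_cons, stepClass_eq, if_pos (by rw [hhead]; exact beq_self_eq_true _)]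
      rw [hA, hB]
      refine ih (m + 1) (by omega) _ _ fd ?_
      intro v
      rw [fa v]
      constructor
      · rintro (hvv | hvv)
        · obtain ⟨j, hj, hc⟩ := (hvis v).1 hvv
          exact ⟨j, by omega, hc⟩
        · exact ⟨m, by omega, hvv⟩
      · rintro ⟨j, hj, hc⟩
        rcases Nat.lt_or_ge j m with hj' | hj'
        · exact Or.inl ((hvis v).2 ⟨j, hj', hc⟩)
        · have : j = m := by omega
          subst this
          exact Or.inr hc
    · -- already visited: both skip
      have hvv : pvVisP vis m := hv
      obtain ⟨j, hj, hc⟩ := (hvis m).1 hvv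
      have hnmin : ¬ (pvMembersB R m).headD 0 = (m : Int) + 1 := by
        rw [membersB_head hm]
        intro hall
        exact hall j hj (pvConn_symm hc)
      have hA : pvOuterA R R.length (m :: List.range' (m + 1) k) vis acc =
          pvOuterA R R.length (List.range' (m + 1) k) vis acc := by
        rw [pvOuterA, if_pos hv]
      have hB : (m :: List.range' (m + 1) k).foldl (pvStepClass R R.length) acc =
          (List.range' (m + 1) k).foldl (pvStepClass R R.length) acc := by
        rw [List.foldl_cons, stepClass_eq, if_neg (by simpa using hnmin)]
      rw [hA, hB]
      refine ih (m + 1) (by omega) _ _ hlen ?_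
      intro v
      constructor
      · intro hvv2
        obtain ⟨j2, hj2, hc2⟩ := (hvis v).1 hvv2
        exact ⟨j2, by omega, hc2⟩
      · rintro ⟨j2, hj2, hc2⟩
        rcases Nat.lt_or_ge j2 m with hj3 | hj3
        · exact (hvis v).2 ⟨j2, hj3, hc2⟩
        · have : j2 = m := by omega
          subst this
          exact (hvis v).2 ⟨j, hj, Relation.ReflTransGen.trans hc hc2⟩

lemma foldl_step_pairwise (R : List (List Int)) :
    ∀ (l : List Nat) (acc : List (List Int)),
      l.Pairwise (· < ·) →
      (∀ c ∈ acc, ∀ i ∈ l, c.headD 0 < (i : Int) + 1) →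
      acc.Pairwise (fun x y => x.headD 0 < y.headD 0) →
      (l.foldl (pvStepClass R R.length) acc).Pairwise (fun x y => x.headD 0 < y.headD 0) := by
  intro l
  induction l with
  | nil => intro acc _ _ h; exact h
  | cons i l ih =>
    intro acc hpl hacc hpacc
    rw [List.foldl_cons, stepClass_eq]
    have hpl' : l.Pairwise (· < ·) := (List.pairwise_cons.1 hpl).2
    have hil : ∀ i' ∈ l, i < i' := (List.pairwise_cons.1 hpl).1
    by_cases hb : (pvMembersB R i).headD 0 == (i : Int) + 1
    · rw [if_pos hb]
      have hhead : (pvMembersB R i).headD 0 = (i : Int) + 1 := by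
        exact beq_iff_eq.1 hb
      refine ih (acc ++ [pvMembersB R i]) hpl' ?_ ?_
      · intro c hc i' hi'
        rcases List.mem_append.1 hc with hc' | hc'
        · exact hacc c hc' i' (List.mem_cons_of_mem _ hi')
        · rw [List.mem_singleton.1 hc', hhead]
          have := hil i' hi'
          omega
      · rw [List.pairwise_append]
        refine ⟨hpacc, List.pairwise_singleton _ _, ?_⟩
        intro a ha b hb'
        rw [List.mem_singleton.1 hb', hhead]
        exact hacc a ha i List.mem_cons_self
    · rw [if_neg hb]
      exact ih acc hpl' (fun c hc i' hi' => hacc c hc i' (List.mem_cons_of_mem _ hi')) hpacc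

-- ===== VERDICT (by name: the statement is the Claim_ definition above) =====
theorem equivalence_classes_spec : Claim_equal_equivalence_classes := by
  unfold Claim_equal_equivalence_classes
  intro R _ _
  unfold Spec_equivalence_classes
  show equivalence_classes R = equivalence_classes_alt R
  have hloop : pvOuterA R R.length (List.range R.length) (List.replicate R.length false) [] =
      (List.range R.length).foldl (pvStepClass R R.length) [] := by
    rw [List.range_eq_range']
    exact loop_eq R R.length 0 (by omega) _ []
      (by simp)
      (fun v => by
        constructor
        · intro h
          rw [pvVisP, getD_replicate] at h
          exact absurd h Bool.false_ne_true
        · rintro ⟨j, hj, _⟩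
          omega)
  have hpw : ((List.range R.length).foldl (pvStepClass R R.length) []).Pairwise
      (fun x y => x.headD 0 < y.headD 0) :=
    foldl_step_pairwise R (List.range R.length) [] List.pairwise_lt_range
      (by simp) List.Pairwise.nil
  show PySem.List.sorted (pvOuterA R R.length (List.range R.length)
      (List.replicate R.length false) []) (fun x => x.headD 0) false =
    (List.range R.length).foldl (pvStepClass R R.length) []
  rw [hloop]
  exact PySem.List.sorted_eq_self_of_pairwise _ _ (hpw.imp (fun h => le_of_lt h))
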